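-- pv_equiv track=rewrite | github.com/Abhay789883/ACC45DAYSOFCODE-2024. | Day8-MONOPOLY2.py | check_monopoly
-- ===== SOURCE A (Python) =====
-- def check_monopoly(test_cases):
--     results = []
--     for profits in test_cases:
--         P, Q, R, S = profits
--         total_other_profits = Q + R + S
--         if P > total_other_profits or Q > (P + R + S) or R > (P + Q + S) or S > (P + Q + R):
--             results.append("YES")
--         else:
--             results.append("NO")
--     return results
-- ===== SOURCE B (Python) =====
-- def check_monopoly(test_cases):
--     if not test_cases:
--         return []
--     a, b, c, d = sorted(test_cases[0])
--     verdict = "YES" if d > a + b + c else "NO"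
--     return [verdict] + check_monopoly(test_cases[1:])
-- ===== Notes on version B (the rewrite author's own statement) =====
-- stated objective: alternative
-- what changed: B rebuilds the result list by recursion on the list (instead of A's loop with an accumulator) and decides each case by sorting the four profits and comparing the largest against the sum of the other three, instead of A's four explicit OR'd comparisons.
import Mathlib
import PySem

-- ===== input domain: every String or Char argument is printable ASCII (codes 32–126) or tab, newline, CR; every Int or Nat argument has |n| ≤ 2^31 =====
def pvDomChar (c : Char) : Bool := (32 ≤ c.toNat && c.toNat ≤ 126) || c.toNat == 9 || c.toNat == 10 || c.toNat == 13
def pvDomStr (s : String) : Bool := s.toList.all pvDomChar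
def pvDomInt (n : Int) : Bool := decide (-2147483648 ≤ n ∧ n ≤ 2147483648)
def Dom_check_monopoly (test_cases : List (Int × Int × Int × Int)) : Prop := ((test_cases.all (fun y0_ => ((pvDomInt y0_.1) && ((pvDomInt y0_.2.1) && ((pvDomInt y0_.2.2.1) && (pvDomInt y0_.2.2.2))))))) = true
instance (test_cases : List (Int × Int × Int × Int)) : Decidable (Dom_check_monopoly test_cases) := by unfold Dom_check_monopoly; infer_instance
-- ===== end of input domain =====

-- B rebuilds the list recursively and decides each case by sorting the four profits and
-- comparing the largest against the sum of the other three; objective: alternative decomposition.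
-- ===== PORT A =====
def check_monopoly (test_cases : List (Int × Int × Int × Int)) : List String :=
  test_cases.foldl (fun results profits =>
    let P := profits.1; let Q := profits.2.1; let R := profits.2.2.1; let S := profits.2.2.2
    let total_other_profits := Q + R + S
    if P > total_other_profits ∨ Q > (P + R + S) ∨ R > (P + Q + S) ∨ S > (P + Q + R) then
      results ++ ["YES"]
    else
      results ++ ["NO"]) []

-- ===== PORT B =====
-- B: recursion on the list; per case, sort the four profits and test top against the rest.
def check_monopoly_alt (test_cases : List (Int × Int × Int × Int)) : List String :=
  match test_cases with
  | [] => []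
  | p :: rest =>
    let verdict :=
      match PySem.List.sorted [p.1, p.2.1, p.2.2.1, p.2.2.2] (fun x => x) false with
      | [a, b, c, d] => if d > a + b + c then "YES" else "NO"
      | _ => "NO"  -- unreachable: sorting a 4-list yields a 4-list (totality guard only)
    [verdict] ++ check_monopoly_alt rest

-- ===== PRECONDITION & SPEC =====
def Spec_check_monopoly (test_cases : List (Int × Int × Int × Int)) (out : List String) : Prop := out = check_monopoly_alt test_cases
instance (test_cases : List (Int × Int × Int × Int)) (out : List String) : Decidable (Spec_check_monopoly test_cases out) := by unfold Spec_check_monopoly; infer_instance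

-- ===== CLAIM (what is proved, stated in full; the proofs are below) =====
def Claim_equal_check_monopoly : Prop := ∀ (test_cases : List (Int × Int × Int × Int)), Dom_check_monopoly test_cases → Spec_check_monopoly test_cases (check_monopoly test_cases)

-- ===== LEMMAS AND PROOFS =====
-- per-tuple agreement: the OR of the four comparisons equals the sorted-top test
theorem elem_eq (P Q R S : Int) :
    (if P > Q + R + S ∨ Q > (P + R + S) ∨ R > (P + Q + S) ∨ S > (P + Q + R) then "YES" else "NO") =
    (match PySem.List.sorted [P, Q, R, S] (fun x => x) false with
     | [a, b, c, d] => if d > a + b + c then "YES" else "NO"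
     | _ => "NO") := by
  have hperm : (PySem.List.sorted [P,Q,R,S] (fun x : Int => x) false).Perm [P,Q,R,S] :=
    PySem.List.sorted_perm ..
  have hpw : (PySem.List.sorted [P,Q,R,S] (fun x : Int => x) false).Pairwise
      (fun u v => (fun x : Int => x) u ≤ (fun x : Int => x) v) :=
    PySem.List.sorted_pairwise ..
  have hlen : (PySem.List.sorted [P,Q,R,S] (fun x : Int => x) false).length = 4 :=
    hperm.length_eq
  rcases h : PySem.List.sorted [P,Q,R,S] (fun x : Int => x) false with
    _ | ⟨a, _ | ⟨b, _ | ⟨c, _ | ⟨d, _ | _⟩⟩⟩⟩ <;>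
    rw [h] at hperm hpw hlen <;>
    simp only [List.length_cons, List.length_nil] at hlen <;> try omega
  -- now the 4-list case
  · have hsum : a + b + c + d = P + Q + R + S := by
      have := hperm.sum_eq
      simp at this; omega
    simp only [List.pairwise_cons, List.mem_cons] at hpw
    obtain ⟨hpw1, hpw2, hpw3, -⟩ := hpw
    have had : a ≤ d := hpw1 d (by simp)
    have hbd : b ≤ d := hpw2 d (by simp)
    have hcd : c ≤ d := hpw3 d (by simp)
    have hdmem : d = P ∨ d = Q ∨ d = R ∨ d = S := by
      have : d ∈ [P,Q,R,S] := hperm.mem_iff.mp (by simp)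
      simpa using this
    have hP : P ≤ d := by
      have : P ∈ [a,b,c,d] := hperm.mem_iff.mpr (by simp)
      simp at this; rcases this with h'|h'|h'|h' <;> omega
    have hQ : Q ≤ d := by
      have : Q ∈ [a,b,c,d] := hperm.mem_iff.mpr (by simp)
      simp at this; rcases this with h'|h'|h'|h' <;> omega
    have hR : R ≤ d := by
      have : R ∈ [a,b,c,d] := hperm.mem_iff.mpr (by simp)
      simp at this; rcases this with h'|h'|h'|h' <;> omega
    have hS : S ≤ d := by
      have : S ∈ [a,b,c,d] := hperm.mem_iff.mpr (by simp)
      simp at this; rcases this with h'|h'|h'|h' <;> omega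
    dsimp only
    split_ifs <;> first | rfl | (exfalso; omega)

theorem check_monopoly_suffix (test_cases : List (Int × Int × Int × Int)) (acc : List String) :
    test_cases.foldl (fun results profits =>
      let P := profits.1; let Q := profits.2.1; let R := profits.2.2.1; let S := profits.2.2.2
      let total_other_profits := Q + R + S
      if P > total_other_profits ∨ Q > (P + R + S) ∨ R > (P + Q + S) ∨ S > (P + Q + R) then
        results ++ ["YES"]
      else
        results ++ ["NO"]) acc = acc ++ check_monopoly_alt test_cases := by
  induction test_cases generalizing acc with
  | nil => simp [check_monopoly_alt]
  | cons p t ih =>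
    obtain ⟨P, Q, R, S⟩ := p
    simp only [List.foldl_cons]
    rw [check_monopoly_alt]
    have h := elem_eq P Q R S
    split_ifs with hc
    · rw [ih]; simp only [List.append_assoc]; congr 1
      simp only [if_pos hc] at h
      simp [← h]
    · rw [ih]; simp only [List.append_assoc]; congr 1
      simp only [if_neg hc] at h
      simp [← h]

-- ===== VERDICT (by name: the statement is the Claim_ definition above) =====
theorem check_monopoly_spec : Claim_equal_check_monopoly := by
  intro tc _
  unfold Spec_check_monopoly check_monopoly
  simpa using check_monopoly_suffix tc []
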